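-- pv_equiv track=rewrite | github.com/tobygf/monoalpha | monoalpha/main.py | caesar
-- ===== SOURCE A (Python) =====
-- import string
--
-- def caesar(offset):
--     """
--     Function returning a caesar-shifted alphabet.
--
--     Args:
--     offset -- caesar shift offset.
--
--     Returns:
--     Code alphabet.
--     """
--     offset = int(offset)
--     plainalpha = string.ascii_lowercase
--     codealpha = "" # Initialises the coded alphabet to be returned.
--     for i in range(26):
--         # Adds offset to index, and then applies modulo
--         # to keep within the range of the alphabet.
--         index = (i+offset)%26
--         codealpha += plainalpha[index]
--     return codealpha
-- ===== SOURCE B (Python) =====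
-- import string
--
-- def caesar(offset):
--     """Caesar-shifted lowercase alphabet via closed-form slice rotation."""
--     k = int(offset) % 26
--     return string.ascii_lowercase[k:] + string.ascii_lowercase[:k]
-- ===== Notes on version B (the rewrite author's own statement) =====
-- stated objective: idiomatic
-- what changed: Replaces A's per-character append loop with per-index modulo arithmetic by computing the reduced shift once and returning the closed-form rotation of two slices of the alphabet.
import Mathlib
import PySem

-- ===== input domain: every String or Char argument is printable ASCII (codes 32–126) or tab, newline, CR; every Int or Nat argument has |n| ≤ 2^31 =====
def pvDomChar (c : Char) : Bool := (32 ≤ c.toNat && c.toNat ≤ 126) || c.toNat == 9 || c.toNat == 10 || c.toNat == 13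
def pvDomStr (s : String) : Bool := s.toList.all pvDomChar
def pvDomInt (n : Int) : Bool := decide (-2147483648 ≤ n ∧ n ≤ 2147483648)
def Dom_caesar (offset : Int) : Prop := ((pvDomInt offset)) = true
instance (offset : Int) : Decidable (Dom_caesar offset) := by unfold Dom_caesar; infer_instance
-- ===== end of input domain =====

-- B replaces A's 26-step append loop by the closed-form rotation of two slices at k = offset % 26 (objective: idiomatic).

-- ===== PORT A =====
def caesar (offset : Int) : String :=
  let plainalpha := "abcdefghijklmnopqrstuvwxyz"
  String.ofList ((PySem.List.pyRange 0 26 1).foldl (fun codealpha i =>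
    codealpha ++ [PySem.List.pyGetD plainalpha.toList (PySem.Int.mod (i + offset) 26) ' ']) [])

-- ===== PORT B =====
def caesar_alt (offset : Int) : String :=
  let k := PySem.Int.mod offset 26
  let s := "abcdefghijklmnopqrstuvwxyz".toList
  String.ofList (PySem.List.slice s (some k) none ++ PySem.List.slice s none (some k))

-- ===== PRECONDITION & SPEC =====
def Spec_caesar (offset : Int) (out : String) : Prop := out = caesar_alt offset
instance (offset : Int) (out : String) : Decidable (Spec_caesar offset out) := by unfold Spec_caesar; infer_instance

-- ===== CLAIM (what is proved, stated in full; the proofs are below) =====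
def Claim_equal_caesar : Prop := ∀ (offset : Int), Dom_caesar offset → Spec_caesar offset (caesar offset)

-- ===== LEMMAS AND PROOFS =====

-- Both programs depend on offset only through offset % 26.
lemma caesar_mod (offset r : Int) (hq : offset % 26 = r) :
    caesar offset = caesar r := by
  have h : ∀ i : Int, PySem.Int.mod (i + offset) 26 = PySem.Int.mod (i + r) 26 := by
    intro i
    simp only [PySem.Int.mod_eq_emod_of_pos (by norm_num : (0:Int) < 26)]
    omega
  simp only [caesar, h]

lemma caesar_alt_mod (offset r : Int) (hq : offset % 26 = r) (hr : r % 26 = r) :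
    caesar_alt offset = caesar_alt r := by
  have h26 : (0:Int) < 26 := by norm_num
  simp only [caesar_alt, PySem.Int.mod_eq_emod_of_pos h26, hq, hr]

lemma caesar_eq_alt (offset : Int) : caesar offset = caesar_alt offset := by
  have h26 : (0:Int) < 26 := by norm_num
  set r := offset % 26 with hrdef
  have hr0 : 0 ≤ r := Int.emod_nonneg _ (by norm_num)
  have hr26 : r < 26 := Int.emod_lt_of_pos _ h26
  have hrr : r % 26 = r := Int.emod_eq_of_lt hr0 hr26
  rw [caesar_mod offset r hrdef.symm, caesar_alt_mod offset r hrdef.symm hrr]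
  interval_cases r <;> decide

-- ===== VERDICT (by name: the statement is the Claim_ definition above) =====
theorem caesar_spec : Claim_equal_caesar := by
  intro offset _
  exact caesar_eq_alt offset
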